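-- pv_equiv track=rewrite | github.com/giteewif/lpllm | lpllm/tutils.py | calculate_device_offset
-- ===== SOURCE A (Python) =====
-- def calculate_device_offset(tensor_index, device_idx):
--     device_offset = 0
--     tensor_device_offsets = {}
--     tensor_copy_chunks = {}
--     tensor_copy_chunks[device_idx] = []
--     tensor_device_offsets[device_idx] = {}
--     single_device_offset = tensor_device_offsets[device_idx]
--     single_copy_chunks_list = tensor_copy_chunks[device_idx]
--     for name, (offset, size) in tensor_index.items():
--         single_device_offset[name] = device_offset
--         single_copy_chunks_list.append(
--             (offset, size, device_offset, 0)
--         )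
--         device_offset += size
--     return tensor_device_offsets, tensor_copy_chunks, device_offset
-- ===== SOURCE B (Python) =====
-- def calculate_device_offset(tensor_index, device_idx):
--     # Prefix-sum table first: offs[i] = start offset of i-th tensor, offs[-1] = total.
--     offs = [0]
--     for _, size in tensor_index.values():
--         offs.append(offs[-1] + size)
--     single_device_offset = dict(zip(tensor_index.keys(), offs))
--     single_copy_chunks_list = [
--         (offset, size, dev_off, 0)
--         for (offset, size), dev_off in zip(tensor_index.values(), offs)
--     ]
--     return {device_idx: single_device_offset}, {device_idx: single_copy_chunks_list}, offs[-1]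
-- ===== Notes on version B (the rewrite author's own statement) =====
-- stated objective: alternative
-- what changed: Replaces A's single running-accumulator loop that mutates a dict and a list in lockstep by first computing the full prefix-sum offset table (with the grand total as its last element) and then assembling the two outputs by zipping names resp. (offset,size) pairs with that table.
import Mathlib
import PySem

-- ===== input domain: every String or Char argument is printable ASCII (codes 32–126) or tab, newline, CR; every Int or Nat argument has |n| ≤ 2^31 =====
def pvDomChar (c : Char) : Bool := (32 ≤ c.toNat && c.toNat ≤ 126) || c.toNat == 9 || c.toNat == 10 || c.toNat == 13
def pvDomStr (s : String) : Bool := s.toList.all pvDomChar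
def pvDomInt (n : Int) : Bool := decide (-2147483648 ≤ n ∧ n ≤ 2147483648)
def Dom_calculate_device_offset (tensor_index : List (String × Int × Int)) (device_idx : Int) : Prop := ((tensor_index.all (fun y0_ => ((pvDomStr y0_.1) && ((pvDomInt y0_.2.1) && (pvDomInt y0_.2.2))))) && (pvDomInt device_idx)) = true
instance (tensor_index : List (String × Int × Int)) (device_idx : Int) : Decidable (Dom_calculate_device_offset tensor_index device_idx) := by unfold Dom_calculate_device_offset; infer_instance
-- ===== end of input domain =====

-- B builds the full prefix-sum offset table first and assembles both outputs by zipping against it,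
-- instead of A's single loop that advances a running offset while mutating a dict and a list in lockstep.


-- ===== PORT A =====
-- literal transliteration of A: one loop over tensor_index.items() carrying
-- (device_offset, single_device_offset as a PySem.Dict, single_copy_chunks_list)
def calculate_device_offset (tensor_index : List (String × Int × Int)) (device_idx : Int) : (List (Int × List (String × Int))) × (List (Int × List (Int × Int × Int × Int))) × Int :=
  let st := tensor_index.foldl
    (fun (st : Int × PySem.Dict String Int × List (Int × Int × Int × Int)) e =>
      (st.1 + e.2.2, st.2.1.insert e.1 st.1, st.2.2 ++ [(e.2.1, e.2.2, st.1, 0)]))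
    (0, PySem.Dict.empty, [])
  ([(device_idx, st.2.1.items)], [(device_idx, st.2.2)], st.1)

-- ===== PORT B =====
-- literal transliteration of B: prefix-sum table offs (offs.append(offs[-1] + size)), then two zips against it
def calculate_device_offset_alt (tensor_index : List (String × Int × Int)) (device_idx : Int) : (List (Int × List (String × Int))) × (List (Int × List (Int × Int × Int × Int))) × Int :=
  let offs := tensor_index.foldl (fun (acc : List Int) e => acc ++ [acc.getLastD 0 + e.2.2]) [0]
  let single_device_offset := (tensor_index.map (·.1)).zip offs
  let single_copy_chunks_list :=
    ((tensor_index.map (fun e => (e.2.1, e.2.2))).zip offs).map (fun p => (p.1.1, p.1.2, p.2, 0))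
  ([(device_idx, single_device_offset)], [(device_idx, single_copy_chunks_list)], offs.getLastD 0)

-- ===== PRECONDITION & SPEC =====
-- Pre_ excludes lists with duplicate tensor names: tensor_index encodes a Python dict, whose keys are
-- always distinct; on duplicate-name lists the dict-overwrite vs zip representations diverge accidentally.
def Pre_calculate_device_offset (tensor_index : List (String × Int × Int)) (device_idx : Int) : Prop :=
  (tensor_index.map (·.1)).Nodup
instance (tensor_index : List (String × Int × Int)) (device_idx : Int) : Decidable (Pre_calculate_device_offset tensor_index device_idx) := by unfold Pre_calculate_device_offset; infer_instance
def pvWitness_calculate_device_offset : (List (String × Int × Int)) × Int := ([("a", 0, 2), ("b", 5, 3)], 1)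
def Spec_calculate_device_offset (tensor_index : List (String × Int × Int)) (device_idx : Int) (out : (List (Int × List (String × Int))) × (List (Int × List (Int × Int × Int × Int))) × Int) : Prop := out = calculate_device_offset_alt tensor_index device_idx
instance (tensor_index : List (String × Int × Int)) (device_idx : Int) (out : (List (Int × List (String × Int))) × (List (Int × List (Int × Int × Int × Int))) × Int) : Decidable (Spec_calculate_device_offset tensor_index device_idx out) := by
  unfold Spec_calculate_device_offset
  letI c : DecidableEq (Int × List (Int × Int × Int × Int)) := inferInstance
  letI d : DecidableEq (List (Int × List (Int × Int × Int × Int))) := inferInstance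
  infer_instance

-- ===== CLAIM (what is proved, stated in full; the proofs are below) =====
def Claim_equal_calculate_device_offset : Prop := ∀ (tensor_index : List (String × Int × Int)) (device_idx : Int), Dom_calculate_device_offset tensor_index device_idx → Pre_calculate_device_offset tensor_index device_idx → Spec_calculate_device_offset tensor_index device_idx (calculate_device_offset tensor_index device_idx)

-- ===== LEMMAS AND PROOFS =====

-- closed forms of the components, parametrised by the running start offset d
def sdoFrom (d : Int) : List (String × Int × Int) → List (String × Int)
  | [] => []
  | e :: l => (e.1, d) :: sdoFrom (d + e.2.2) l

def chunksFrom (d : Int) : List (String × Int × Int) → List (Int × Int × Int × Int)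
  | [] => []
  | e :: l => (e.2.1, e.2.2, d, 0) :: chunksFrom (d + e.2.2) l

def offsFrom (d : Int) : List (String × Int × Int) → List Int
  | [] => []
  | e :: l => (d + e.2.2) :: offsFrom (d + e.2.2) l

def endOff (d : Int) : List (String × Int × Int) → Int
  | [] => d
  | e :: l => endOff (d + e.2.2) l

lemma foldA_eq (l : List (String × Int × Int)) (d : Int) (dd : PySem.Dict String Int)
    (cs : List (Int × Int × Int × Int))
    (hfresh : ∀ e ∈ l, dd.contains e.1 = false) (hnd : (l.map (·.1)).Nodup) :
    l.foldl
      (fun (st : Int × PySem.Dict String Int × List (Int × Int × Int × Int)) e =>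
        (st.1 + e.2.2, st.2.1.insert e.1 st.1, st.2.2 ++ [(e.2.1, e.2.2, st.1, 0)]))
      (d, dd, cs)
    = (endOff d l, PySem.Dict.mk (dd.items ++ sdoFrom d l), cs ++ chunksFrom d l) := by
  induction l generalizing d dd cs with
  | nil => simp [endOff, sdoFrom, chunksFrom]
  | cons e l ih =>
      simp only [List.foldl_cons]
      rw [ih (d + e.2.2) (dd.insert e.1 d) _ ?_ ?_]
      · have hins : (dd.insert e.1 d).items = dd.items ++ [(e.1, d)] :=
          PySem.Dict.items_insert_of_not_contains _ _ (hfresh e (List.mem_cons_self))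
        simp [endOff, sdoFrom, chunksFrom, hins]
      · intro f hf
        have hne : f.1 ≠ e.1 := by
          simp only [List.map_cons, List.nodup_cons] at hnd
          intro h; exact hnd.1 (h ▸ List.mem_map_of_mem hf)
        have hc := hfresh f (List.mem_cons_of_mem _ hf)
        rw [PySem.Dict.contains_insert]
        simp [hc, hne]
      · simpa using hnd.of_cons

lemma foldB_eq (l : List (String × Int × Int)) (a : List Int) (t : Int) :
    l.foldl (fun (acc : List Int) e => acc ++ [acc.getLastD 0 + e.2.2]) (a ++ [t])
    = (a ++ [t]) ++ offsFrom t l := by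
  induction l generalizing a t with
  | nil => simp [offsFrom]
  | cons e l ih =>
      simp only [List.foldl_cons, List.getLastD_concat]
      rw [ih (a ++ [t]) (t + e.2.2)]
      simp [offsFrom]

lemma zip_names_offs (l : List (String × Int × Int)) (t : Int) :
    (l.map (·.1)).zip (t :: offsFrom t l) = sdoFrom t l := by
  induction l generalizing t with
  | nil => simp [sdoFrom]
  | cons e l ih => simp [offsFrom, sdoFrom, ih]

lemma zip_pairs_offs (l : List (String × Int × Int)) (t : Int) :
    ((l.map (fun e => (e.2.1, e.2.2))).zip (t :: offsFrom t l)).map (fun p => (p.1.1, p.1.2, p.2, 0))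
    = chunksFrom t l := by
  induction l generalizing t with
  | nil => simp [chunksFrom]
  | cons e l ih => simp [offsFrom, chunksFrom, ih]

lemma getLastD_offs (l : List (String × Int × Int)) (t : Int) :
    (t :: offsFrom t l).getLastD 0 = endOff t l := by
  induction l generalizing t with
  | nil => simp [offsFrom, endOff]
  | cons e l ih => simpa [offsFrom, endOff] using ih (t + e.2.2)

-- ===== VERDICT (by name: the statement is the Claim_ definition above) =====
theorem calculate_device_offset_spec : Claim_equal_calculate_device_offset := by
  intro ti di _ hpre
  have hA := foldA_eq ti 0 PySem.Dict.empty [] (fun e _ => rfl) hpre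
  have hB := foldB_eq ti [] 0
  simp only [List.nil_append] at hB
  unfold Spec_calculate_device_offset calculate_device_offset calculate_device_offset_alt
  simp only [hA, hB, List.singleton_append]
  rw [zip_names_offs, zip_pairs_offs, getLastD_offs]
  rfl
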